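-- pv_equiv track=rewrite | github.com/hsk980911/Algorithm | 프로그래머스/택배 상자.py | solution
-- ===== SOURCE A (Python) =====
-- def solution(order):
--     main = [i for i in range(1,len(order)+1)]
--     sub = []
--
--     cnt = 0
--     for i in order:
--         if len(main) > 0 and main[0] <= i:
--             sub.extend(main[:i-main[0]])
--             main = main[i-main[0]+1:]
--             cnt += 1
--             continue
--         elif sub:
--             if sub[-1] == i:
--                 sub.pop()
--                 cnt += 1
--                 continue
--             else:
--                 break
--         else:
--             break
--     return cnt
-- ===== SOURCE B (Python) =====
-- def solution(order):
--     # Interval run-length simulation: the side area always holds a union of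
--     # consecutive runs, so keep a stack of (lo, hi) intervals instead of a
--     # flat list, and track the conveyor by a single pointer nxt (boxes
--     # nxt..n remain).  Each step is O(1), no list slicing/copying.
--     n = len(order)
--     nxt = 1
--     ivs = []   # stack of intervals (lo, hi), lo <= hi; topmost run is last
--     cnt = 0
--     for i in order:
--         if nxt <= n and nxt <= i:
--             hi = min(i - 1, n)           # boxes moved aside before box i
--             if nxt <= hi:
--                 ivs.append((nxt, hi))
--             nxt = i + 1
--         elif ivs and ivs[-1][1] == i:
--             lo, hi = ivs.pop()
--             if lo < hi:
--                 ivs.append((lo, hi - 1))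
--         else:
--             return cnt
--         cnt += 1
--     return cnt
-- ===== Notes on version B (the rewrite author's own statement) =====
-- stated objective: faster
-- what changed: Replaces A's materialised conveyor list and flat side-stack (rebuilt by slicing/extend each step) with an integer belt pointer plus a run-length stack of (lo,hi) intervals whose top is shrunk on a pop, making each step O(1) instead of O(n).
import Mathlib
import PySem

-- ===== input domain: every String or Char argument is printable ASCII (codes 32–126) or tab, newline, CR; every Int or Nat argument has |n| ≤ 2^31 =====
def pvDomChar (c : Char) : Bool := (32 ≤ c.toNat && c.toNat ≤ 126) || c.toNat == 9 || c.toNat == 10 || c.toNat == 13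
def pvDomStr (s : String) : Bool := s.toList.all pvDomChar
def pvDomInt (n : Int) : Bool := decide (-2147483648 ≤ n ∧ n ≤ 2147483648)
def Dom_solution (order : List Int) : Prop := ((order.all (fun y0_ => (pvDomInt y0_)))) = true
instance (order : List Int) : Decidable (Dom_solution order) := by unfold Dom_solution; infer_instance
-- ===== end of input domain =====

-- B replaces A's materialised conveyor list and flat side-stack (rebuilt by slicing each
-- step) with an integer belt pointer plus a run-length stack of (lo,hi) intervals.

-- ===== PORT A =====
-- loop over `order` with state (main, sub, cnt); `break` = return cnt
def solutionLoop (l : List Int) (main sub : List Int) (cnt : Int) : Int :=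
  match l with
  | [] => cnt
  | i :: rest =>
    if 0 < main.length ∧ PySem.List.pyGetD main 0 0 ≤ i then
      solutionLoop rest
        (PySem.List.slice main (some (i - PySem.List.pyGetD main 0 0 + 1)) none)
        (sub ++ PySem.List.slice main none (some (i - PySem.List.pyGetD main 0 0)))
        (cnt + 1)
    else if sub ≠ [] then
      if PySem.List.pyGetD sub (-1) 0 = i then
        solutionLoop rest main sub.dropLast (cnt + 1)   -- sub.pop() drops the last element
      else cnt
    else cnt

def solution (order : List Int) : Int :=
  solutionLoop order (PySem.List.pyRange 1 ((order.length : Int) + 1) 1) [] 0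

-- ===== PORT B =====
-- loop over `order` with state (nxt, ivs, cnt); boxes nxt..n are still on the belt,
-- ivs is the stack of side-area runs (lo,hi), topmost last; `return cnt` = stop
def solutionAltLoop (l : List Int) (n nxt : Int) (ivs : List (Int × Int)) (cnt : Int) : Int :=
  match l with
  | [] => cnt
  | i :: rest =>
    if nxt ≤ n ∧ nxt ≤ i then
      -- hi = min (i - 1) n, the last box moved aside (inlined)
      solutionAltLoop rest n (i + 1)
        (if nxt ≤ min (i - 1) n then ivs ++ [(nxt, min (i - 1) n)] else ivs) (cnt + 1)
    else
      match ivs.getLast? with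
      | some (lo, hi) =>
        if hi = i then
          solutionAltLoop rest n nxt
            (if lo < hi then ivs.dropLast ++ [(lo, hi - 1)] else ivs.dropLast) (cnt + 1)
        else cnt
      | none => cnt

def solution_alt (order : List Int) : Int :=
  solutionAltLoop order (order.length : Int) 1 [] 0

-- ===== PRECONDITION & SPEC =====
def Spec_solution (order : List Int) (out : Int) : Prop := out = solution_alt order
instance (order : List Int) (out : Int) : Decidable (Spec_solution order out) := by unfold Spec_solution; infer_instance

-- ===== CLAIM (what is proved, stated in full; the proofs are below) =====
def Claim_equal_solution : Prop := ∀ (order : List Int), Dom_solution order → Spec_solution order (solution order)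

-- ===== LEMMAS AND PROOFS =====

-- the flat side-stack that a run-length stack denotes
def ivsFlat (ivs : List (Int × Int)) : List Int :=
  ivs.flatMap (fun p => PySem.List.pyRange p.1 (p.2 + 1) 1)

lemma ivsFlat_append (ivs : List (Int × Int)) (p : Int × Int) :
    ivsFlat (ivs ++ [p]) = ivsFlat ivs ++ PySem.List.pyRange p.1 (p.2 + 1) 1 := by
  simp [ivsFlat]

lemma pyRange_one_drop (b : Int) (k : Nat) : ∀ a : Int,
    (PySem.List.pyRange a b 1).drop k = PySem.List.pyRange (a + k) b 1 := by
  induction k with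
  | zero => intro a; simp
  | succ k ih =>
    intro a
    by_cases h : a < b
    · rw [PySem.List.pyRange_one_cons h]
      simp only [List.drop_succ_cons, ih (a + 1)]
      congr 1; push_cast; ring
    · rw [PySem.List.pyRange_one_eq_nil (by omega), PySem.List.pyRange_one_eq_nil (by omega)]
      simp

lemma pyRange_one_take (a b : Int) (k : Nat) :
    (PySem.List.pyRange a b 1).take k = PySem.List.pyRange a (min (a + k) b) 1 := by
  rw [PySem.List.pyRange_one, PySem.List.pyRange_one, ← List.map_take, List.take_range]
  congr 2
  omega

-- main invariant: A's loop on the denoted state equals B's loop on the run-length state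
lemma loop_eq (l : List Int) : ∀ (n nxt : Int) (ivs : List (Int × Int)) (cnt : Int),
    (∀ p ∈ ivs, p.1 ≤ p.2) →
    solutionLoop l (PySem.List.pyRange nxt (n + 1) 1) (ivsFlat ivs) cnt
      = solutionAltLoop l n nxt ivs cnt := by
  induction l with
  | nil => intro n nxt ivs cnt _; rfl
  | cons i rest ih =>
    intro n nxt ivs cnt hInv
    by_cases h1 : nxt ≤ n ∧ nxt ≤ i
    · -- belt branch
      have hlt : nxt < n + 1 := by omega
      rw [solutionLoop, solutionAltLoop, if_pos h1]
      have hhead : PySem.List.pyGetD (PySem.List.pyRange nxt (n + 1) 1) 0 0 = nxt := by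
        rw [PySem.List.pyRange_one_cons hlt, PySem.List.pyGetD_zero_cons]
      have hlen : 0 < (PySem.List.pyRange nxt (n + 1) 1).length := by
        rw [PySem.List.pyRange_one_cons hlt]; simp
      rw [if_pos (by exact ⟨hlen, by rw [hhead]; exact h1.2⟩)]
      rw [hhead]
      have htake : PySem.List.slice (PySem.List.pyRange nxt (n + 1) 1) none (some (i - nxt))
          = PySem.List.pyRange nxt (min (i - 1) n + 1) 1 := by
        rw [PySem.List.slice_to _ (show (0:Int) ≤ i - nxt by omega), pyRange_one_take]
        congr 2; omega
      have hdrop : PySem.List.slice (PySem.List.pyRange nxt (n + 1) 1) (some (i - nxt + 1)) none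
          = PySem.List.pyRange (i + 1) (n + 1) 1 := by
        rw [PySem.List.slice_from _ (show (0:Int) ≤ i - nxt + 1 by omega), pyRange_one_drop]
        congr 1; omega
      rw [htake, hdrop]
      by_cases hpush : nxt ≤ min (i - 1) n
      · rw [if_pos hpush, ← ivsFlat_append ivs (nxt, min (i - 1) n)]
        exact ih n (i + 1) _ (cnt + 1) (by
          intro p hp
          rcases List.mem_append.mp hp with hp | hp
          · exact hInv p hp
          · simp at hp; subst hp; exact hpush)
      · rw [if_neg hpush]
        have : PySem.List.pyRange nxt (min (i - 1) n + 1) 1 = [] :=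
          PySem.List.pyRange_one_eq_nil (by omega)
        rw [this, List.append_nil]
        exact ih n (i + 1) ivs (cnt + 1) hInv
    · -- side-stack branch
      have hnil : ¬ (0 < (PySem.List.pyRange nxt (n + 1) 1).length
          ∧ PySem.List.pyGetD (PySem.List.pyRange nxt (n + 1) 1) 0 0 ≤ i) := by
        by_cases hn : nxt ≤ n
        · have hlt : nxt < n + 1 := by omega
          rw [PySem.List.pyRange_one_cons hlt, PySem.List.pyGetD_zero_cons]
          intro hc; exact h1 ⟨hn, hc.2⟩
        · rw [PySem.List.pyRange_one_eq_nil (by omega)]; simp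
      rw [solutionLoop, solutionAltLoop, if_neg hnil, if_neg h1]
      cases hLast : ivs.getLast? with
      | none =>
        have : ivs = [] := List.getLast?_eq_none_iff.mp hLast
        subst this
        simp [ivsFlat]
      | some p =>
        obtain ⟨lo, hi⟩ := p
        obtain ⟨dl, hivs⟩ := List.getLast?_eq_some_iff.mp hLast
        have hdl : ivs.dropLast = dl := by rw [hivs]; simp
        have hlohi : lo ≤ hi := hInv (lo, hi) (by rw [hivs]; simp)
        have hflat : ivsFlat ivs
            = ivsFlat dl ++ (PySem.List.pyRange lo hi 1 ++ [hi]) := by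
          conv_lhs => rw [hivs]
          rw [ivsFlat_append, PySem.List.pyRange_one_succ_right hlohi]
        have hsubne : ivsFlat ivs ≠ [] := by rw [hflat]; simp
        rw [if_pos hsubne]
        have hlast2 : (ivsFlat ivs).getLast? = some hi := by
          rw [hflat, ← List.append_assoc, List.getLast?_concat]
        have hgetlast : PySem.List.pyGetD (ivsFlat ivs) (-1) 0 = hi := by
          rw [PySem.List.pyGetD_neg_one _ 0 hsubne]
          have := List.getLast?_eq_some_getLast hsubne
          rw [this] at hlast2
          exact Option.some.inj hlast2
        rw [hgetlast, hdl]
        dsimp only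
        by_cases hhit : hi = i
        · rw [if_pos hhit, if_pos hhit]
          have hdropflat : (ivsFlat ivs).dropLast
              = ivsFlat dl ++ PySem.List.pyRange lo hi 1 := by
            rw [hflat, ← List.append_assoc, List.dropLast_concat]
          by_cases hshrink : lo < hi
          · rw [if_pos hshrink, hdropflat]
            have heq : ivsFlat (dl ++ [(lo, hi - 1)])
                = ivsFlat dl ++ PySem.List.pyRange lo hi 1 := by
              rw [ivsFlat_append]; congr 2; omega
            rw [← heq]
            exact ih n nxt _ (cnt + 1) (by
              intro q hq
              rcases List.mem_append.mp hq with hq | hq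
              · exact hInv q (by rw [hivs]; exact List.mem_append_left _ hq)
              · simp at hq; subst hq; simp; omega)
          · rw [if_neg hshrink, hdropflat]
            have hnilr : PySem.List.pyRange lo hi 1 = [] :=
              PySem.List.pyRange_one_eq_nil (by omega)
            rw [hnilr, List.append_nil]
            exact ih n nxt _ (cnt + 1) (by
              intro q hq
              exact hInv q (by rw [hivs]; exact List.mem_append_left _ hq))
        · rw [if_neg hhit, if_neg hhit]

-- ===== VERDICT (by name: the statement is the Claim_ definition above) =====
theorem solution_spec : Claim_equal_solution := by
  intro order _
  show solution order = solution_alt order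
  unfold solution solution_alt
  exact loop_eq order order.length 1 [] 0 (by simp)
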